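-- pv_equiv track=rewrite | github.com/rippcurr/roster | parse_docx.py | find_first_and_last_colon_word
-- ===== SOURCE A (Python) =====
-- def find_first_and_last_colon_word(text_string):
--     """
--     Finds the first and last words in a string that contain a colon (':').
--
--     Args:
--         text_string (str): The input string to search.
--
--     Returns:
--         tuple: A tuple containing two elements:
--                - The first word found that contains a colon (str), or None if not found.
--                - The last word found that contains a colon (str), or None if not found.
--     """
--     words = text_string.split()  # Split the string into words by whitespace
--     first_colon_word = None
--     last_colon_word = None
--
--     # Find the first word containing a colon
--     for word in words:
--         if ':' in word:
--             first_colon_word = word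
--             break # Stop after finding the first one
--
--     # Find the last word containing a colon (iterate in reverse)
--     for word in reversed(words):
--         if ':' in word:
--             last_colon_word = word
--             break # Stop after finding the first one from the end
--
--     return first_colon_word, last_colon_word
-- ===== SOURCE B (Python) =====
-- def find_first_and_last_colon_word(text_string):
--     """Single forward pass maintaining both endpoints (no reversed second scan)."""
--     first_colon_word = None
--     last_colon_word = None
--     for word in text_string.split():
--         if ':' in word:
--             if first_colon_word is None:
--                 first_colon_word = word
--             last_colon_word = word
--     return first_colon_word, last_colon_word
-- ===== Notes on version B (the rewrite author's own statement) =====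
-- stated objective: simpler
-- what changed: Replaces A's two directional early-exit scans (forward, then over reversed(words)) with one forward traversal that maintains both the first and the last colon-containing word in accumulators.
import Mathlib
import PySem

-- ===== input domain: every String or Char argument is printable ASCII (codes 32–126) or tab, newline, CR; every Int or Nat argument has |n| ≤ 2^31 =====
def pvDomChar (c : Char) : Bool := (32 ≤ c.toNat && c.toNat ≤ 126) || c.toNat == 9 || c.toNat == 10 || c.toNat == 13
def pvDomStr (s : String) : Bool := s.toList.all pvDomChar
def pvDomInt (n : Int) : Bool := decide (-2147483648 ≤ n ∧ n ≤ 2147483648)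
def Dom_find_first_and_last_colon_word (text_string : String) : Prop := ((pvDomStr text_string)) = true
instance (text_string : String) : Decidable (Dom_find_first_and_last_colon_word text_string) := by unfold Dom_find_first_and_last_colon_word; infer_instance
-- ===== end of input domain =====

-- B replaces A's two directional early-exit scans over the word list by one forward pass
-- maintaining both endpoints (objective: simpler — one loop instead of two).


-- ===== PORT A =====
-- A's break-on-first-hit loop: walk the words, return the first one containing ':' (none at end).
def pvScanColon (words : List String) : Option String :=
  match words with
  | [] => none
  | w :: ws => if PySem.Str.isIn ":" w then some w else pvScanColon ws

-- A: forward scan for the first colon word, then a second scan over reversed(words) for the last.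
def find_first_and_last_colon_word (text_string : String) : Option String × Option String :=
  let words := PySem.Str.split₀ text_string
  let first_colon_word := pvScanColon words
  let last_colon_word := pvScanColon words.reverse
  (first_colon_word, last_colon_word)

-- ===== PORT B =====
-- B: one forward fold maintaining (first_colon_word, last_colon_word).
def find_first_and_last_colon_word_alt (text_string : String) : Option String × Option String :=
  (PySem.Str.split₀ text_string).foldl
    (fun p w =>
      if PySem.Str.isIn ":" w then
        ((if p.1.isNone then some w else p.1), some w)
      else p)
    (none, none)

-- ===== PRECONDITION & SPEC =====
def Spec_find_first_and_last_colon_word (text_string : String) (out : Option String × Option String) : Prop := out = find_first_and_last_colon_word_alt text_string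
instance (text_string : String) (out : Option String × Option String) : Decidable (Spec_find_first_and_last_colon_word text_string out) := by unfold Spec_find_first_and_last_colon_word; infer_instance

-- ===== CLAIM (what is proved, stated in full; the proofs are below) =====
def Claim_equal_find_first_and_last_colon_word : Prop := ∀ (text_string : String), Dom_find_first_and_last_colon_word text_string → Spec_find_first_and_last_colon_word text_string (find_first_and_last_colon_word text_string)

-- ===== LEMMAS AND PROOFS =====

theorem pvScanColon_eq_find? (ws : List String) :
    pvScanColon ws = ws.find? (fun w => PySem.Str.isIn ":" w) := by
  induction ws with
  | nil => rfl
  | cons w ws ih =>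
    cases hb : PySem.Chars.isIn [':'] w.toList <;>
      simp [pvScanColon, hb, ih]

theorem pvFold_spec (ws : List String) (f l : Option String) :
    ws.foldl
      (fun p w =>
        if PySem.Str.isIn ":" w then
          ((if p.1.isNone then some w else p.1), some w)
        else p)
      (f, l)
    = (f.or (ws.find? (fun w => PySem.Str.isIn ":" w)),
       (ws.reverse.find? (fun w => PySem.Str.isIn ":" w)).or l) := by
  induction ws generalizing f l with
  | nil => simp
  | cons w ws ih =>
    simp at ih
    cases hb : PySem.Chars.isIn [':'] w.toList
    · simp [List.foldl_cons, hb, ih, List.find?_append, List.find?]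
    · cases f <;>
        simp [List.foldl_cons, hb, ih, List.find?_append, List.find?]

-- ===== VERDICT (by name: the statement is the Claim_ definition above) =====
theorem find_first_and_last_colon_word_spec : Claim_equal_find_first_and_last_colon_word := by
  intro s _
  unfold Spec_find_first_and_last_colon_word
  unfold find_first_and_last_colon_word find_first_and_last_colon_word_alt
  show (pvScanColon (PySem.Str.split₀ s), pvScanColon (PySem.Str.split₀ s).reverse) = _
  rw [pvFold_spec, pvScanColon_eq_find?, pvScanColon_eq_find?]
  simp
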